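-- pv_equiv track=rewrite | github.com/mpvqc/mpvQC | mpvqc/utility/resizer.py | calculate_horizontal_layout_sizes
-- ===== SOURCE A (Python) =====
-- def calculate_horizontal_layout_sizes(
--     video_width: int,
--     video_height: int,
--     header_height: int,
--     border_size: int,
--     handle_width: int,
--     table_width: int,
--     available_width: int,
-- ) -> tuple[int, int, int, int]:
--     width_without_table = 2 * border_size + video_width + handle_width
--
--     new_table_width = table_width
--     while width_without_table + new_table_width > available_width:
--         new_table_width -= 5
--
--     window_width = 2 * border_size + video_width + handle_width + new_table_width
--     window_height = 2 * border_size + header_height + video_height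
--     table_height = video_height
--
--     return window_width, window_height, new_table_width, table_height
-- ===== SOURCE B (Python) =====
-- def calculate_horizontal_layout_sizes(
--     video_width: int,
--     video_height: int,
--     header_height: int,
--     border_size: int,
--     handle_width: int,
--     table_width: int,
--     available_width: int,
-- ) -> tuple[int, int, int, int]:
--     width_without_table = 2 * border_size + video_width + handle_width
--     excess = width_without_table + table_width - available_width
--     if excess > 0:
--         new_table_width = table_width - 5 * ((excess + 4) // 5)
--     else:
--         new_table_width = table_width
--     window_width = width_without_table + new_table_width
--     window_height = 2 * border_size + header_height + video_height
--     table_height = video_height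
--     return window_width, window_height, new_table_width, table_height
-- ===== Notes on version B (the rewrite author's own statement) =====
-- stated objective: faster
-- what changed: Replaced the subtract-5-until-it-fits while loop with a single closed-form ceiling-division computation of the shrunken table width.
import Mathlib
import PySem

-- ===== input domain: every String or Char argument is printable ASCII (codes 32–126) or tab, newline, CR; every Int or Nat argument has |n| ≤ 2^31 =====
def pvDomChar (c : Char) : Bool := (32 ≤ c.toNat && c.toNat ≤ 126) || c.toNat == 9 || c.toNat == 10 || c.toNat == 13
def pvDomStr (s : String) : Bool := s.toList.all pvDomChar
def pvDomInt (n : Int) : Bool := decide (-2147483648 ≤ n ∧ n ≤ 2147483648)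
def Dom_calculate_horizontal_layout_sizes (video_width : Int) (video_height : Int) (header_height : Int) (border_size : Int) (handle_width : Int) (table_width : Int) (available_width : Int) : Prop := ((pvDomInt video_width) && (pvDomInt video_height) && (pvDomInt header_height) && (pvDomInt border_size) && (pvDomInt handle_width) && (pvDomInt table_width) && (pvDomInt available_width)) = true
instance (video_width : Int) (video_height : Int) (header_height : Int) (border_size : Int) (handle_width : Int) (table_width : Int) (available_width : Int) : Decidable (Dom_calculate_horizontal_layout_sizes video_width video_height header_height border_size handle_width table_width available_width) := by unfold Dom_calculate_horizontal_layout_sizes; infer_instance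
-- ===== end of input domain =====

-- B replaces A's subtract-5-until-it-fits loop with one closed-form ceiling-division computation (faster: O(1) vs O(excess/5)).


-- ===== PORT A =====
-- the `while width_without_table + new_table_width > available_width: new_table_width -= 5` loop
def pvShrinkLoop (width_without_table : Int) (available_width : Int) (new_table_width : Int) : Int :=
  if width_without_table + new_table_width > available_width then
    pvShrinkLoop width_without_table available_width (new_table_width - 5)
  else
    new_table_width
termination_by (width_without_table + new_table_width - available_width).toNat
decreasing_by omega

def calculate_horizontal_layout_sizes (video_width : Int) (video_height : Int) (header_height : Int) (border_size : Int) (handle_width : Int) (table_width : Int) (available_width : Int) : List Int :=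
  let width_without_table := 2 * border_size + video_width + handle_width
  let new_table_width := pvShrinkLoop width_without_table available_width table_width
  let window_width := 2 * border_size + video_width + handle_width + new_table_width
  let window_height := 2 * border_size + header_height + video_height
  let table_height := video_height
  [window_width, window_height, new_table_width, table_height]

-- ===== PORT B =====
def calculate_horizontal_layout_sizes_alt (video_width : Int) (video_height : Int) (header_height : Int) (border_size : Int) (handle_width : Int) (table_width : Int) (available_width : Int) : List Int :=
  let width_without_table := 2 * border_size + video_width + handle_width
  let excess := width_without_table + table_width - available_width
  let new_table_width :=
    if excess > 0 then table_width - 5 * PySem.Int.floordiv (excess + 4) 5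
    else table_width
  let window_width := width_without_table + new_table_width
  let window_height := 2 * border_size + header_height + video_height
  let table_height := video_height
  [window_width, window_height, new_table_width, table_height]

-- ===== PRECONDITION & SPEC =====
-- A is total (the shrink loop always terminates), so no Pre_ is defined.
def Spec_calculate_horizontal_layout_sizes (video_width : Int) (video_height : Int) (header_height : Int) (border_size : Int) (handle_width : Int) (table_width : Int) (available_width : Int) (out : List Int) : Prop := out = calculate_horizontal_layout_sizes_alt video_width video_height header_height border_size handle_width table_width available_width
instance (video_width : Int) (video_height : Int) (header_height : Int) (border_size : Int) (handle_width : Int) (table_width : Int) (available_width : Int) (out : List Int) : Decidable (Spec_calculate_horizontal_layout_sizes video_width video_height header_height border_size handle_width table_width available_width out) := by unfold Spec_calculate_horizontal_layout_sizes; infer_instance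

-- ===== CLAIM (what is proved, stated in full; the proofs are below) =====
def Claim_equal_calculate_horizontal_layout_sizes : Prop := ∀ (video_width : Int) (video_height : Int) (header_height : Int) (border_size : Int) (handle_width : Int) (table_width : Int) (available_width : Int), Dom_calculate_horizontal_layout_sizes video_width video_height header_height border_size handle_width table_width available_width → Spec_calculate_horizontal_layout_sizes video_width video_height header_height border_size handle_width table_width available_width (calculate_horizontal_layout_sizes video_width video_height header_height border_size handle_width table_width available_width)

-- ===== LEMMAS AND PROOFS =====
theorem pvShrinkLoop_closed (w a : Int) : ∀ (n : Nat) (t : Int), (w + t - a).toNat ≤ n →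
    pvShrinkLoop w a t = (if w + t - a > 0 then t - 5 * PySem.Int.floordiv (w + t - a + 4) 5 else t) := by
  intro n
  induction n with
  | zero =>
    intro t ht
    rw [pvShrinkLoop, if_neg (by omega : ¬ w + t > a), if_neg (by omega : ¬ w + t - a > 0)]
  | succ n ih =>
    intro t ht
    rw [pvShrinkLoop]
    by_cases h : w + t > a
    · rw [if_pos h, ih (t - 5) (by omega), if_pos (by omega : w + t - a > 0)]
      by_cases h5 : w + (t - 5) - a > 0
      · rw [if_pos h5, PySem.Int.floordiv_eq_ediv_of_pos (by omega),
            PySem.Int.floordiv_eq_ediv_of_pos (by omega)]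
        omega
      · rw [if_neg h5, PySem.Int.floordiv_eq_ediv_of_pos (by omega)]
        omega
    · rw [if_neg h, if_neg (by omega : ¬ w + t - a > 0)]

-- ===== VERDICT (by name: the statement is the Claim_ definition above) =====
theorem calculate_horizontal_layout_sizes_spec : Claim_equal_calculate_horizontal_layout_sizes := by
  intro vw vh hh bs hw tw aw _
  unfold Spec_calculate_horizontal_layout_sizes
  unfold calculate_horizontal_layout_sizes calculate_horizontal_layout_sizes_alt
  simp only
  rw [pvShrinkLoop_closed (2 * bs + vw + hw) aw (2 * bs + vw + hw + tw - aw).toNat tw le_rfl]
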